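-- pv_equiv track=rewrite | github.com/talesCPV/Livro---Programa-o-em-Python3 | exercicio_1_1.py | change_dig
-- ===== SOURCE A (Python) =====
-- def change_dig(str_dg,int_dg):
-- 	i = 0
-- 	resp = ''
-- 	while i < len(str_dg):
-- 		if not str_dg[i] == ' ':
-- 			resp += str(int_dg)
-- 		else:
-- 			resp += str_dg[i]
-- 		i += 1
-- 	return resp
-- ===== SOURCE B (Python) =====
-- def change_dig(str_dg, int_dg):
--     return ' '.join(str(int_dg) * len(tok) for tok in str_dg.split(' '))
-- ===== Notes on version B (the rewrite author's own statement) =====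
-- stated objective: faster
-- what changed: Replaces A's index-based while loop with quadratic string concatenation by a tokenize/expand/rejoin pass: split on ' ', map each token to str(int_dg) repeated len(token) times, rejoin with ' '.join.
import Mathlib
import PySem

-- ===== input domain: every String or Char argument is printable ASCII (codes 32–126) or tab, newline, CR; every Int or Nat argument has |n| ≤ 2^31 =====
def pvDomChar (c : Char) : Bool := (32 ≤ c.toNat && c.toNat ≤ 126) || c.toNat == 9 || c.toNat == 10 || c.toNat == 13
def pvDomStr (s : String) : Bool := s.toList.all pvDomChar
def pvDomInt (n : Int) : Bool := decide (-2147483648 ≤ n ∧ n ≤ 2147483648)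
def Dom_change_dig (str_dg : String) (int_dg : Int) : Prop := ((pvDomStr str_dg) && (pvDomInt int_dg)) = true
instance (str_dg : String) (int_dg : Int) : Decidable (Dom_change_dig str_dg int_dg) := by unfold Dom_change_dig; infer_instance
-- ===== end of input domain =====

-- B replaces A's per-character while loop by split(' ') / expand each token / ' '.join — same value, idiomatic decomposition.

-- ===== PORT A =====
-- A: walk the characters left to right, appending str(int_dg) for a non-space and the space itself otherwise.
def change_dig (str_dg : String) (int_dg : Int) : String :=
  String.ofList (str_dg.toList.foldl
    (fun resp c => if (c == ' ') = false then resp ++ PySem.Int.toChars int_dg else resp ++ [c])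
    [])

-- ===== PORT B =====
-- B: ' '.join(str(int_dg) * len(tok) for tok in str_dg.split(' '))
def change_dig_alt (str_dg : String) (int_dg : Int) : String :=
  String.ofList (PySem.Chars.join [' ']
    ((PySem.Chars.splitOn str_dg.toList [' ']).map
      (fun tok => PySem.List.pyRepeat (PySem.Int.toChars int_dg) (tok.length : Int))))

-- ===== PRECONDITION & SPEC =====
def Spec_change_dig (str_dg : String) (int_dg : Int) (out : String) : Prop := out = change_dig_alt str_dg int_dg
instance (str_dg : String) (int_dg : Int) (out : String) : Decidable (Spec_change_dig str_dg int_dg out) := by unfold Spec_change_dig; infer_instance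

-- ===== CLAIM (what is proved, stated in full; the proofs are below) =====
def Claim_equal_change_dig : Prop := ∀ (str_dg : String) (int_dg : Int), Dom_change_dig str_dg int_dg → Spec_change_dig str_dg int_dg (change_dig str_dg int_dg)

-- ===== LEMMAS AND PROOFS =====

-- PySem's split on a one-char separator is Mathlib's splitOnP on that char.
theorem splitOn_go_space :
    ∀ fuel (l cur : List Char) (acc : List (List Char)), l.length < fuel →
      PySem.Chars.splitOn.go [' '] fuel l cur acc
        = acc.reverse ++ ((l.splitOnP (· == ' ')).modifyHead (cur.reverse ++ ·)) := by
  intro fuel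
  induction fuel with
  | zero => intro l cur acc h; omega
  | succ f ih =>
    intro l cur acc h
    cases l with
    | nil => simp [PySem.Chars.splitOn.go, List.splitOnP_nil]
    | cons c rest =>
      by_cases hc : c = ' '
      · subst hc
        rw [show PySem.Chars.splitOn.go [' '] (f+1) (' '::rest) cur acc
              = PySem.Chars.splitOn.go [' '] f rest [] (cur.reverse :: acc) from by
            simp [PySem.Chars.splitOn.go, List.isPrefixOf]]
        rw [ih rest [] (cur.reverse :: acc) (by simpa using Nat.lt_of_succ_lt_succ h)]
        rcases hne : rest.splitOnP (· == ' ') with _ | ⟨x, xs⟩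
        · exact absurd hne (List.splitOnP_ne_nil _ _)
        · simp [List.splitOnP_cons, hne]
      · rw [show PySem.Chars.splitOn.go [' '] (f+1) (c::rest) cur acc
              = PySem.Chars.splitOn.go [' '] f rest (c :: cur) acc from by
            simp [PySem.Chars.splitOn.go, List.isPrefixOf, Ne.symm hc]]
        rw [ih rest (c :: cur) acc (by simpa using Nat.lt_of_succ_lt_succ h)]
        rcases hne : rest.splitOnP (· == ' ') with _ | ⟨x, xs⟩
        · exact absurd hne (List.splitOnP_ne_nil _ _)
        · simp [List.splitOnP_cons, hne, hc]

theorem splitOn_space (cs : List Char) :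
    PySem.Chars.splitOn cs [' '] = cs.splitOnP (· == ' ') := by
  rw [PySem.Chars.splitOn, splitOn_go_space _ _ _ _ (Nat.lt_succ_self _)]
  rcases hne : cs.splitOnP (· == ' ') with _ | ⟨x, xs⟩
  · exact absurd hne (List.splitOnP_ne_nil _ _)
  · simp

-- pulling a prefix out of the first joined piece
theorem intercalate_append_head (d x : List Char) (xs : List (List Char)) :
    [' '].intercalate ((d ++ x) :: xs) = d ++ [' '].intercalate (x :: xs) := by
  cases xs <;> simp [List.intercalate]

-- the core identity: join ∘ map expand ∘ split  =  per-character flatMap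
theorem join_split_eq_flatMap (d : List Char) (cs : List Char) :
    [' '].intercalate ((cs.splitOnP (· == ' ')).map
        (fun tok => (List.replicate tok.length d).flatten))
      = cs.flatMap (fun c => if (c == ' ') = false then d else [c]) := by
  induction cs with
  | nil => simp [List.splitOnP_nil, List.intercalate]
  | cons c rest ih =>
    rw [List.splitOnP_cons]
    by_cases hc : c = ' '
    · subst hc
      rcases hne : rest.splitOnP (· == ' ') with _ | ⟨x, xs⟩
      · exact absurd hne (List.splitOnP_ne_nil _ _)
      · rw [hne] at ih
        simp only [List.flatMap_cons]
        rw [← ih]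
        simp [List.intercalate]
    · rcases hne : rest.splitOnP (· == ' ') with _ | ⟨x, xs⟩
      · exact absurd hne (List.splitOnP_ne_nil _ _)
      · rw [hne] at ih
        simp only [hc, List.flatMap_cons, beq_iff_eq, if_false]
        rw [← ih]
        simp only [List.modifyHead_cons, List.map_cons, List.length_cons,
          List.replicate_succ, List.flatten_cons]
        rw [intercalate_append_head]
        simp [hc]

-- ===== VERDICT (by name: the statement is the Claim_ definition above) =====
-- A's accumulator loop is the flatMap of its per-character contribution
theorem foldl_change (d : List Char) (cs : List Char) : ∀ init : List Char,
    cs.foldl (fun resp c => if (c == ' ') = false then resp ++ d else resp ++ [c]) init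
      = init ++ cs.flatMap (fun c => if (c == ' ') = false then d else [c]) := by
  induction cs with
  | nil => simp
  | cons c rest ih =>
    intro init
    rw [List.foldl_cons, List.flatMap_cons]
    rw [ih]
    by_cases hc : c = ' '
    · simp [hc]
    · simp [hc, List.append_assoc]

theorem change_dig_spec : Claim_equal_change_dig := by
  intro s n _
  unfold Spec_change_dig change_dig change_dig_alt
  rw [foldl_change, splitOn_space, PySem.Chars.join]
  simp only [PySem.List.pyRepeat, Int.toNat_natCast]
  rw [join_split_eq_flatMap (PySem.Int.toChars n) s.toList]
  simp
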